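-- pv_equiv track=rewrite | github.com/YCWangLab/eProbe | src/eprobe/core/fasta.py | split_fasta_dict
-- ===== SOURCE A (Python) =====
-- from collections import OrderedDict
--
-- FastaDict = OrderedDict[str, str]
--
-- def split_fasta_dict(
--     fasta_dict: FastaDict,
--     num_parts: int,
-- ) -> list[FastaDict]:
--     """
--     Split FASTA dictionary into multiple parts for parallel processing.
--
--     Distributes sequences round-robin across parts to balance workload.
--
--     Args:
--         fasta_dict: Input FASTA dictionary
--         num_parts: Number of parts to split into
--
--     Returns:
--         List of FastaDict objects
--     """
--     if num_parts <= 0: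
--         raise ValueError("num_parts must be positive")
--
--     parts: list[FastaDict] = [OrderedDict() for _ in range(num_parts)]
--
--     for i, (seq_id, sequence) in enumerate(fasta_dict.items()):
--         part_idx = i % num_parts
--         parts[part_idx][seq_id] = sequence
--
--     return parts
-- ===== SOURCE B (Python) =====
-- from collections import OrderedDict
--
--
-- def split_fasta_dict(fasta_dict, num_parts):
--     """Split FASTA dictionary round-robin into num_parts, via strided slicing."""
--     if num_parts <= 0:
--         raise ValueError("num_parts must be positive")
--     items = list(fasta_dict.items())
--     return [OrderedDict(items[i::num_parts]) for i in range(num_parts)]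
-- ===== Notes on version B (the rewrite author's own statement) =====
-- stated objective: idiomatic
-- what changed: Replaced the index-counting round-robin loop that assigns each entry into parts[i % num_parts] one by one with per-part strided slices: part i is built in one shot as OrderedDict(items[i::num_parts]).
import Mathlib
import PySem

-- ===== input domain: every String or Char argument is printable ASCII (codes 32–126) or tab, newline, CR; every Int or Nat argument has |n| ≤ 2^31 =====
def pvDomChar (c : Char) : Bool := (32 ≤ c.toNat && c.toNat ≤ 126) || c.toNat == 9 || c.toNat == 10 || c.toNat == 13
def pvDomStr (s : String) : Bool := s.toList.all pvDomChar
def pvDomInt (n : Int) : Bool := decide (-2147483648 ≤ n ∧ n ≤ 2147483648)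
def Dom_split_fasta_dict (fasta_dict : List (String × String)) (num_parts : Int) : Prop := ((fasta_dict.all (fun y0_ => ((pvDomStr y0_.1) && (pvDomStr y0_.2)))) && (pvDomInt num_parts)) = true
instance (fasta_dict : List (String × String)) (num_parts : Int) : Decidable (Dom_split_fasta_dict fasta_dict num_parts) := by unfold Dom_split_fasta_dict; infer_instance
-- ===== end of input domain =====

-- B builds each part in one shot as OrderedDict(items[i::num_parts]) (strided slices) instead of
-- A's index-counting loop assigning entries one by one into parts[i % num_parts]; objective: idiomatic.


-- ===== PORT A =====
-- the 'for i, (seq_id, sequence) in enumerate(fasta_dict.items())' loop, with its counter i and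
-- the mutable parts list; parts[part_idx][seq_id] = sequence is a dict insert.
-- i % num_parts is computed on Nat: exact, since i ≥ 0 and num_parts > 0 here (Python % agrees).
def pvLoopA (items : List (String × String)) (i : Nat) (k : Nat)
    (parts : List (PySem.Dict String String)) : List (PySem.Dict String String) :=
  match items with
  | [] => parts
  | (seq_id, sequence) :: rest =>
      let part_idx := i % k
      pvLoopA rest (i + 1) k
        (parts.set part_idx ((parts.getD part_idx PySem.Dict.empty).insert seq_id sequence))

def split_fasta_dict (fasta_dict : List (String × String)) (num_parts : Int) : List (List (String × String)) :=
  if num_parts ≤ 0 then []  -- Python raises ValueError here; excluded by Pre_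
  else
    (pvLoopA fasta_dict 0 num_parts.toNat
      (List.replicate num_parts.toNat PySem.Dict.empty)).map PySem.Dict.items

-- ===== PORT B =====
-- xs[::k] for a positive step k (hand-ported Python slice with step; exact for k ≥ 1: take every
-- k-th element starting at the head).
def pvStride {α : Type} (xs : List α) (k : Nat) : List α :=
  match xs with
  | [] => []
  | x :: rest => x :: pvStride (rest.drop (k - 1)) k
termination_by xs.length
decreasing_by simp

def split_fasta_dict_alt (fasta_dict : List (String × String)) (num_parts : Int) : List (List (String × String)) :=
  if num_parts ≤ 0 then []  -- raise ValueError; excluded by Pre_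
  else
    (List.range num_parts.toNat).map (fun i =>
      -- items[i::num_parts] = drop i, then every num_parts-th; OrderedDict(pairs) = Dict.ofList
      (PySem.Dict.ofList (pvStride (fasta_dict.drop i) num_parts.toNat)).items)

-- ===== PRECONDITION & SPEC =====
-- 0 < num_parts: Python A raises ValueError otherwise.  Nodup keys: the argument represents a
-- Python dict (which cannot hold duplicate keys), so association lists with duplicate first
-- components do not represent any actual input; they are excluded as unrepresentable.
def Pre_split_fasta_dict (fasta_dict : List (String × String)) (num_parts : Int) : Prop :=
  0 < num_parts ∧ (fasta_dict.map Prod.fst).Nodup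
instance (fasta_dict : List (String × String)) (num_parts : Int) : Decidable (Pre_split_fasta_dict fasta_dict num_parts) := by unfold Pre_split_fasta_dict; infer_instance

def pvWitness_split_fasta_dict : (List (String × String)) × Int :=
  ([("seq1", "ACGT"), ("seq2", "GGCC"), ("seq3", "TTAA")], 2)

def Spec_split_fasta_dict (fasta_dict : List (String × String)) (num_parts : Int) (out : List (List (String × String))) : Prop := out = split_fasta_dict_alt fasta_dict num_parts
instance (fasta_dict : List (String × String)) (num_parts : Int) (out : List (List (String × String))) : Decidable (Spec_split_fasta_dict fasta_dict num_parts out) := by unfold Spec_split_fasta_dict; infer_instance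

-- ===== CLAIM (what is proved, stated in full; the proofs are below) =====
def Claim_equal_split_fasta_dict : Prop := ∀ (fasta_dict : List (String × String)) (num_parts : Int), Dom_split_fasta_dict fasta_dict num_parts → Pre_split_fasta_dict fasta_dict num_parts → Spec_split_fasta_dict fasta_dict num_parts (split_fasta_dict fasta_dict num_parts)

-- ===== LEMMAS AND PROOFS =====

lemma pvStride_nil {α : Type} (k : Nat) : pvStride ([] : List α) k = [] := by
  rw [pvStride.eq_def]

lemma pvStride_cons {α : Type} (x : α) (rest : List α) (k : Nat) :
    pvStride (x :: rest) k = x :: pvStride (rest.drop (k - 1)) k := by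
  conv_lhs => rw [pvStride.eq_def]

-- x % k for x < 2k, as an if-expression omega can handle
lemma pvModCase (k x : Nat) (_hk : 0 < k) (hx : x < 2 * k) :
    x % k = if x < k then x else x - k := by
  split
  · exact Nat.mod_eq_of_lt (by omega)
  · rw [Nat.mod_eq_sub_mod (by omega)]
    exact Nat.mod_eq_of_lt (by omega)

lemma pvSuccMod (i k : Nat) (hk : 0 < k) :
    (i + 1) % k = if i % k + 1 = k then 0 else i % k + 1 := by
  have h1 := Nat.div_add_mod i k
  have ho : i % k < k := Nat.mod_lt _ hk
  split
  · have h2 : k * (i / k + 1) = k * (i / k) + k := by ring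
    have h3 : i + 1 = k * (i / k + 1) := by omega
    rw [h3, Nat.mul_mod_right]
  · have h3 : i + 1 = k * (i / k) + (i % k + 1) := by omega
    rw [h3, Nat.mul_add_mod]
    exact Nat.mod_eq_of_lt (by omega)

-- characterisation of A's loop: part j ends up holding its start value with the strided
-- sub-list of items belonging to residue class j inserted in order
lemma pvLoopA_char (k : Nat) (hk : 0 < k) :
    ∀ (items : List (String × String)) (i : Nat) (parts : List (PySem.Dict String String)),
      parts.length = k →
      pvLoopA items i k parts
        = (List.range k).map (fun j =>
            (pvStride (items.drop ((j + k - i % k) % k)) k).foldl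
              (fun d p => d.insert p.1 p.2) (parts.getD j PySem.Dict.empty)) := by
  intro items
  induction items with
  | nil =>
      intro i parts hlen
      simp only [pvLoopA, List.drop_nil, pvStride_nil, List.foldl_nil]
      apply List.ext_getElem
      · simp [hlen]
      · intro j h1 h2
        simp only [List.getElem_map, List.getElem_range]
        rw [List.getD_eq_getElem?_getD, List.getElem?_eq_getElem (by simpa [hlen] using h2),
          Option.getD_some]
  | cons hd rest ih =>
      obtain ⟨seq_id, sequence⟩ := hd
      intro i parts hlen
      have ho : i % k < k := Nat.mod_lt _ hk
      rw [pvLoopA, ih (i + 1) _ (by simp [hlen])]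
      apply List.map_congr_left
      intro j hj
      rw [List.mem_range] at hj
      have hsucc := pvSuccMod i k hk
      by_cases hje : j = i % k
      · -- this element lands in part j
        subst hje
        have hd0 : (i % k + k - i % k) % k = 0 := by
          have h : i % k + k - i % k = k := by omega
          rw [h, Nat.mod_self]
        have heq : (i % k + k - (i + 1) % k) % k = k - 1 := by
          rw [hsucc]
          split
          · rw [pvModCase k (i % k + k - 0) hk (by omega)]
            split <;> omega
          · rw [pvModCase k (i % k + k - (i % k + 1)) hk (by omega)]
            split <;> omega
        have hset : ((parts.set (i % k) ((parts.getD (i % k) PySem.Dict.empty).insert seq_id sequence)).getD (i % k) PySem.Dict.empty)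
            = (parts.getD (i % k) PySem.Dict.empty).insert seq_id sequence := by
          rw [List.getD_eq_getElem?_getD, List.getElem?_set_self (by omega), Option.getD_some]
        rw [heq, hset, hd0, List.drop_zero, pvStride_cons, List.foldl_cons]
      · -- part j untouched by this element
        have hget : ((parts.set (i % k) ((parts.getD (i % k) PySem.Dict.empty).insert seq_id sequence)).getD j PySem.Dict.empty)
            = parts.getD j PySem.Dict.empty := by
          rw [List.getD_eq_getElem?_getD, List.getElem?_set_ne (by omega), ← List.getD_eq_getElem?_getD]
        have hdpos : 0 < (j + k - i % k) % k := by
          rw [pvModCase k (j + k - i % k) hk (by omega)]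
          split <;> omega
        have heq : (j + k - (i + 1) % k) % k = (j + k - i % k) % k - 1 := by
          rw [hsucc]
          split
          · rw [pvModCase k (j + k - 0) hk (by omega),
              pvModCase k (j + k - i % k) hk (by omega)]
            split <;> split <;> omega
          · rw [pvModCase k (j + k - (i % k + 1)) hk (by omega),
              pvModCase k (j + k - i % k) hk (by omega)]
            split <;> split <;> omega
        have hdrop : ((seq_id, sequence) :: rest).drop ((j + k - i % k) % k)
            = rest.drop ((j + k - i % k) % k - 1) := by
          rw [show (j + k - i % k) % k = ((j + k - i % k) % k - 1) + 1 by omega]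
          rfl
        rw [hget, heq, hdrop]

-- ===== VERDICT (by name: the statement is the Claim_ definition above) =====
theorem split_fasta_dict_spec : Claim_equal_split_fasta_dict := by
  intro fasta_dict num_parts _ hpre
  unfold Spec_split_fasta_dict split_fasta_dict split_fasta_dict_alt
  obtain ⟨hpos, _⟩ := hpre
  rw [if_neg (by omega), if_neg (by omega)]
  set k := num_parts.toNat with hkdef
  have hk : 0 < k := by omega
  rw [pvLoopA_char k hk fasta_dict 0 _ (by simp)]
  rw [List.map_map]
  apply List.map_congr_left
  intro j hj
  rw [List.mem_range] at hj
  have hzero : (j + k - 0 % k) % k = j := by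
    simp [Nat.mod_eq_of_lt hj]
  rw [Function.comp_apply, hzero]
  have hgetD : (List.replicate k (PySem.Dict.empty : PySem.Dict String String)).getD j PySem.Dict.empty = PySem.Dict.empty := by
    rw [List.getD_eq_getElem?_getD, List.getElem?_replicate_of_lt hj, Option.getD_some]
  rw [hgetD]
  rfl
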